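-- pv_equiv track=rewrite | github.com/humorbeing/python_github | convolutional_layer_implementation/playground_v0002/WORKINGON_cnn.py | Pool
-- ===== SOURCE A (Python) =====
-- def Pool(V, i, j, k, kernel):
--     values = []
--     locations = []
--     for m in range(kernel):
--         for n in range(kernel):
--             row = j * kernel + m
--             col = k * kernel + n
--             values.append(V[i][row][col])
--             locations.append((i, row, col))
--     max_value = max(values)
--     ind = values.index(max_value)
--     location = locations[ind]
--     return max_value, location
-- ===== SOURCE B (Python) =====
-- def Pool(V, i, j, k, kernel):
--     # single flat pass with a running best; strict '>' keeps the first maximum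
--     row0 = j * kernel
--     col0 = k * kernel
--     best = V[i][row0][col0]
--     loc = (i, row0, col0)
--     for t in range(1, kernel * kernel):
--         m, n = divmod(t, kernel)
--         row = j * kernel + m
--         col = k * kernel + n
--         v = V[i][row][col]
--         if v > best:
--             best = v
--             loc = (i, row, col)
--     return best, loc
-- ===== Notes on version B (the rewrite author's own statement) =====
-- stated objective: simpler
-- what changed: Replaces the two accumulated lists plus max() / .index() / list indexing with one flat loop over range(kernel*kernel) (divmod recovers m,n) keeping a running best value and location, updating on strict '>' so the first maximum wins exactly as max+index does.
import Mathlib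
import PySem

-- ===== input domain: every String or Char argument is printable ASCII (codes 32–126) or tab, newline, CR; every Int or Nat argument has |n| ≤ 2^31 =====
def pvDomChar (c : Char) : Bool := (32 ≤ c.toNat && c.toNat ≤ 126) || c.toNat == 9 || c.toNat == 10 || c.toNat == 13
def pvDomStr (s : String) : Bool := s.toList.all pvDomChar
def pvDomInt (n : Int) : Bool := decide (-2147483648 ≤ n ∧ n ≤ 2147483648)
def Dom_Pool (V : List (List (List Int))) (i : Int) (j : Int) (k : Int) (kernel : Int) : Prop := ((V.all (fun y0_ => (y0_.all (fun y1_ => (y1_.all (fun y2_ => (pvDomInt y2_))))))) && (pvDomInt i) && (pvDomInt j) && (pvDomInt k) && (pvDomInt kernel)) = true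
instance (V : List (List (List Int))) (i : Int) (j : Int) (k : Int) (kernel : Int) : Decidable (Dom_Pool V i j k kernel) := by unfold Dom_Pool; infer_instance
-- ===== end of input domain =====

-- B replaces A's two accumulated lists + max/.index by one flat divmod loop with a
-- running strict max (same result: first maximal window cell wins); objective: simpler.

-- shared cell access V[i][row][col] (exact under Pre_, which demands all three lookups in range)
def pvCell (V : List (List (List Int))) (i row col : Int) : Int :=
  PySem.List.pyGetD (PySem.List.pyGetD (PySem.List.pyGetD V i []) row []) col 0

-- ===== PORT A =====
def Pool (V : List (List (List Int))) (i : Int) (j : Int) (k : Int) (kernel : Int) : Int × (Int × Int × Int) :=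
  let st : List Int × List (Int × Int × Int) :=
    (PySem.List.pyRange 0 kernel 1).foldl (fun st m =>
      (PySem.List.pyRange 0 kernel 1).foldl (fun st n =>
        let row := j * kernel + m
        let col := k * kernel + n
        (st.1 ++ [pvCell V i row col], st.2 ++ [(i, row, col)])) st) ([], [])
  let values := st.1
  let locations := st.2
  let max_value := (PySem.List.max? values (fun x => x)).getD 0
  let ind := (PySem.List.index? values max_value).getD 0
  let location := locations.getD ind (0, 0, 0)
  (max_value, location)

-- ===== PORT B =====
def Pool_alt (V : List (List (List Int))) (i : Int) (j : Int) (k : Int) (kernel : Int) : Int × (Int × Int × Int) :=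
  let row0 := j * kernel
  let col0 := k * kernel
  let init : Int × (Int × Int × Int) := (pvCell V i row0 col0, (i, row0, col0))
  let best :=
    (PySem.List.pyRange 1 (kernel * kernel) 1).foldl (fun best t =>
      let m := PySem.Int.floordiv t kernel
      let n := PySem.Int.mod t kernel
      let row := j * kernel + m
      let col := k * kernel + n
      let v := pvCell V i row col
      if best.1 < v then (v, (i, row, col)) else best) init
  best

-- ===== PRECONDITION & SPEC =====
-- Pre_ = exactly where Python A returns: kernel ≥ 1 (else max([]) raises ValueError) and every
-- window access V[i][j*kernel+m][k*kernel+n] in range (Python negative-index rule; else IndexError).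
-- The plane-length guard (implied by window validity: kernel consecutive valid row indices need
-- kernel ≤ 2·len) only short-circuits so that deciding Pre_ never builds a huge range.
def pvPreB (V : List (List (List Int))) (i j k kernel : Int) : Bool :=
  if kernel ≤ 0 then false
  else if 2 * ((PySem.List.pyGetD V i []).length : Int) < kernel then false
  else (PySem.List.pyRange 0 kernel 1).all (fun m =>
    (PySem.List.pyRange 0 kernel 1).all (fun n =>
      (((PySem.List.pyGet? V i).bind
          (fun r => PySem.List.pyGet? r (j * kernel + m))).bind
          (fun r => PySem.List.pyGet? r (k * kernel + n))).isSome))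

def Pre_Pool (V : List (List (List Int))) (i : Int) (j : Int) (k : Int) (kernel : Int) : Prop :=
  pvPreB V i j k kernel = true
instance (V : List (List (List Int))) (i : Int) (j : Int) (k : Int) (kernel : Int) : Decidable (Pre_Pool V i j k kernel) := by unfold Pre_Pool; infer_instance

def pvWitness_Pool : List (List (List Int)) × Int × Int × Int × Int := ([[[1, 2], [3, 4]]], 0, 0, 0, 2)

def Spec_Pool (V : List (List (List Int))) (i : Int) (j : Int) (k : Int) (kernel : Int) (out : Int × (Int × Int × Int)) : Prop := out = Pool_alt V i j k kernel
instance (V : List (List (List Int))) (i : Int) (j : Int) (k : Int) (kernel : Int) (out : Int × (Int × Int × Int)) : Decidable (Spec_Pool V i j k kernel out) := by unfold Spec_Pool; infer_instance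

-- ===== CLAIM (what is proved, stated in full; the proofs are below) =====
def Claim_equal_Pool : Prop := ∀ (V : List (List (List Int))) (i : Int) (j : Int) (k : Int) (kernel : Int), Dom_Pool V i j k kernel → Pre_Pool V i j k kernel → Spec_Pool V i j k kernel (Pool V i j k kernel)

-- ===== LEMMAS AND PROOFS =====

-- the "first maximal pair" fold both programs boil down to
def pvFM {α : Type} (a : Int × α) (l : List (Int × α)) : Int × α :=
  l.foldl (fun b p => if b.1 < p.1 then p else b) a

theorem pvFM_spec {α : Type} (l : List (Int × α)) (a : Int × α) :
    (∀ p ∈ a :: l, p.1 ≤ (pvFM a l).1) ∧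
    ∃ pre suf, a :: l = pre ++ pvFM a l :: suf ∧ ∀ p ∈ pre, p.1 < (pvFM a l).1 := by
  induction l generalizing a with
  | nil =>
    refine ⟨?_, [], [], by simp [pvFM], by simp⟩
    intro p hp; simp at hp; simp [pvFM, hp]
  | cons b t ih =>
    have hstep : pvFM a (b :: t) = pvFM (if a.1 < b.1 then b else a) t := rfl
    by_cases hab : a.1 < b.1
    · obtain ⟨hmax, pre, suf, hdec, hpre⟩ := ih b
      rw [hstep, if_pos hab]
      have hb1 : b.1 ≤ (pvFM b t).1 := hmax b (List.mem_cons_self)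
      refine ⟨?_, a :: pre, suf, by simpa using hdec, ?_⟩
      · intro p hp
        rcases List.mem_cons.mp hp with h | h
        · exact h ▸ le_of_lt (lt_of_lt_of_le hab hb1)
        · exact hmax p h
      · intro p hp
        rcases List.mem_cons.mp hp with h | h
        · exact h ▸ lt_of_lt_of_le hab hb1
        · exact hpre p h
    · obtain ⟨hmax, pre, suf, hdec, hpre⟩ := ih a
      rw [hstep, if_neg hab]
      have hb : b.1 ≤ a.1 := not_lt.mp hab
      have ha1 : a.1 ≤ (pvFM a t).1 := hmax a (List.mem_cons_self)
      have hmax' : ∀ p ∈ a :: b :: t, p.1 ≤ (pvFM a t).1 := by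
        intro p hp
        rcases List.mem_cons.mp hp with h | h
        · exact h ▸ ha1
        rcases List.mem_cons.mp h with h2 | h2
        · exact h2 ▸ le_trans hb ha1
        · exact hmax p (List.mem_cons_of_mem _ h2)
      cases pre with
      | nil =>
        simp only [List.nil_append] at hdec
        have hf : a = pvFM a t := (List.cons.injEq _ _ _ _).mp hdec |>.1
        exact ⟨hmax', [], b :: t, by simp [← hf], by simp⟩
      | cons x pre' =>
        simp only [List.cons_append] at hdec
        have hx : a = x := (List.cons.injEq _ _ _ _).mp hdec |>.1
        have ht : t = pre' ++ pvFM a t :: suf := (List.cons.injEq _ _ _ _).mp hdec |>.2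
        have hax : a.1 < (pvFM a t).1 := hx ▸ hpre x (List.mem_cons_self)
        refine ⟨hmax', a :: b :: pre', suf, by simp [← ht], ?_⟩
        intro p hp
        rcases List.mem_cons.mp hp with h | h
        · exact h ▸ hax
        rcases List.mem_cons.mp h with h2 | h2
        · exact h2 ▸ lt_of_le_of_lt hb hax
        · exact hpre p (List.mem_cons_of_mem _ h2)

-- A's double loop builds (map fst, map snd) of the window list
theorem pool_loop_eq {α β : Type} (g : Int → Int → α) (h : Int → Int → β) (outer inner : List Int) :
    outer.foldl (fun st m => inner.foldl (fun st n => (st.1 ++ [g m n], st.2 ++ [h m n])) st) (([], []) : List α × List β) =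
      ((outer.flatMap (fun m => inner.map (g m)) , outer.flatMap (fun m => inner.map (h m)))) := by
  have inner_lem : ∀ (v : Int → α) (w : Int → β) (l : List Int) (st : List α × List β),
      l.foldl (fun st n => (st.1 ++ [v n], st.2 ++ [w n])) st = (st.1 ++ l.map v, st.2 ++ l.map w) := by
    intro v w l
    induction l with
    | nil => intro st; simp
    | cons x xs ih => intro st; simp [ih]
  suffices H : ∀ st : List α × List β,
      outer.foldl (fun st m => inner.foldl (fun st n => (st.1 ++ [g m n], st.2 ++ [h m n])) st) st =
        (st.1 ++ outer.flatMap (fun m => inner.map (g m)), st.2 ++ outer.flatMap (fun m => inner.map (h m))) by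
    simpa using H ([], [])
  induction outer with
  | nil => intro st; simp
  | cons x xs ih =>
    intro st
    rw [List.foldl_cons, inner_lem, ih]
    simp

-- flat divmod enumeration = nested enumeration (Nat form)
theorem range_divmod {α : Type} (Q : Nat → Nat → α) (κ m : Nat) (hκ : 0 < κ) :
    (List.range (m * κ)).map (fun t => Q (t / κ) (t % κ)) =
      (List.range m).flatMap (fun a => (List.range κ).map (fun n => Q a n)) := by
  induction m with
  | zero => simp
  | succ m ih =>
    have h1 : (m + 1) * κ = m * κ + κ := by ring
    rw [h1, List.range_add, List.map_append, ih, List.range_succ, List.flatMap_append]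
    congr 1
    simp only [List.map_map, List.flatMap_cons, List.flatMap_nil,
      List.append_nil]
    apply List.map_congr_left
    intro n hn
    have hnκ : n < κ := List.mem_range.mp hn
    have hd : (m * κ + n) / κ = m := by
      rw [Nat.mul_comm, Nat.mul_add_div hκ, Nat.div_eq_of_lt hnκ]
      omega
    have hm : (m * κ + n) % κ = n := by
      rw [Nat.mul_comm, Nat.mul_add_mod, Nat.mod_eq_of_lt hnκ]
    simp [Function.comp, hd, hm]

theorem getD_append_cons {α : Type} (xs : List α) (y : α) (ys : List α) (d : α) :
    (xs ++ y :: ys).getD xs.length d = y := by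
  induction xs with
  | nil => rfl
  | cons x t _ => simp

-- the two ports agree whenever the window is nonempty
theorem pool_eq (V : List (List (List Int))) (i j k kernel : Int) (hK : 0 < kernel) :
    Pool V i j k kernel = Pool_alt V i j k kernel := by
  obtain ⟨κ, hker⟩ : ∃ κ : Nat, kernel = (κ : Int) := ⟨kernel.toNat, (Int.toNat_of_nonneg hK.le).symm⟩
  subst hker
  have hκ : 0 < κ := by exact_mod_cast hK
  -- the window, in A's m-then-n order, as (value, location) pairs
  set P : Int → Int → Int × (Int × Int × Int) := fun m n =>
    (pvCell V i (j * (κ : Int) + m) (k * (κ : Int) + n), (i, j * (κ : Int) + m, k * (κ : Int) + n)) with hP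
  set W : List (Int × (Int × Int × Int)) :=
    (PySem.List.pyRange 0 (κ : Int) 1).flatMap (fun m => (PySem.List.pyRange 0 (κ : Int) 1).map (fun n => P m n)) with hW
  set Wtl : List (Int × (Int × Int × Int)) :=
    (PySem.List.pyRange 1 ((κ : Int) * (κ : Int)) 1).map
      (fun t => P (PySem.Int.floordiv t (κ : Int)) (PySem.Int.mod t (κ : Int))) with hWtl
  have h1 : (((κ : Int) * (κ : Int)) - 0).toNat = κ * κ := by omega
  have h2 : (((κ : Int)) - 0).toNat = κ := by omega
  -- flat divmod enumeration = A's nested enumeration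
  have hflat : (PySem.List.pyRange 0 ((κ : Int) * (κ : Int)) 1).map
      (fun t => P (PySem.Int.floordiv t (κ : Int)) (PySem.Int.mod t (κ : Int))) = W := by
    rw [hW, PySem.List.pyRange_one 0 ((κ : Int) * (κ : Int)), PySem.List.pyRange_one 0 (κ : Int), h1, h2]
    simp only [List.map_map, List.flatMap_map, Function.comp_def, zero_add]
    rw [show (fun t : Nat => P (PySem.Int.floordiv (t : Int) (κ : Int)) (PySem.Int.mod (t : Int) (κ : Int))) =
        (fun t : Nat => P ((t / κ : Nat) : Int) ((t % κ : Nat) : Int)) from funext fun t => by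
      rw [PySem.Int.floordiv_natCast, PySem.Int.mod_natCast]]
    exact range_divmod (fun a n => P (a : Int) (n : Int)) κ κ hκ
  -- W is nonempty with head = the (0,0) cell
  have h00 : 0 < (κ : Int) * (κ : Int) := by positivity
  have hcons : (PySem.List.pyRange 0 ((κ : Int) * (κ : Int)) 1) =
      0 :: PySem.List.pyRange 1 ((κ : Int) * (κ : Int)) 1 := PySem.List.pyRange_one_cons h00
  have hWdec : W = P 0 0 :: Wtl := by
    rw [← hflat, hcons, List.map_cons]
    congr 1
  -- B is the first-max fold over W's tail
  have hB : Pool_alt V i j k (κ : Int) = pvFM (P 0 0) Wtl := by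
    show (PySem.List.pyRange 1 ((κ : Int) * (κ : Int)) 1).foldl _ _ = _
    rw [hWtl, pvFM, List.foldl_map]
    simp [hP]
  -- A computes the same first maximal pair via max / index / lookup
  obtain ⟨hmax, pre, suf, hdec, hpre⟩ := pvFM_spec Wtl (P 0 0)
  rw [← hWdec] at hdec hmax
  set f := pvFM (P 0 0) Wtl with hf
  have hloop : ((PySem.List.pyRange 0 (κ : Int) 1).foldl (fun st m =>
        (PySem.List.pyRange 0 (κ : Int) 1).foldl (fun st n =>
          (st.1 ++ [pvCell V i (j * (κ : Int) + m) (k * (κ : Int) + n)],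
           st.2 ++ [(i, j * (κ : Int) + m, k * (κ : Int) + n)])) st)
        (([], []) : List Int × List (Int × Int × Int))) = (W.map Prod.fst, W.map Prod.snd) := by
    rw [pool_loop_eq (fun m n => pvCell V i (j * (κ : Int) + m) (k * (κ : Int) + n))
        (fun m n => (i, j * (κ : Int) + m, k * (κ : Int) + n)) _ _, hW]
    simp [hP, List.map_flatMap, List.map_map, Function.comp_def]
  have hWfst : W.map Prod.fst = pre.map Prod.fst ++ (f.1 :: suf.map Prod.fst) := by
    rw [hdec]; simp
  have hWsnd : W.map Prod.snd = pre.map Prod.snd ++ (f.2 :: suf.map Prod.snd) := by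
    rw [hdec]; simp
  have hfmem : f ∈ W := by rw [hdec]; exact List.mem_append_right _ (List.mem_cons_self)
  -- max(values) = f.1
  have hmax' : PySem.List.max? (W.map Prod.fst) (fun x => x) = some f.1 := by
    obtain ⟨mv, hmv⟩ : ∃ mv, PySem.List.max? (W.map Prod.fst) (fun x => x) = some mv := by
      cases hc : PySem.List.max? (W.map Prod.fst) (fun x => x) with
      | none =>
        exfalso
        have := (PySem.List.max?_eq_none_iff (xs := W.map Prod.fst) (key := fun x => x)).mp hc
        rw [hWfst] at this; simp at this
      | some mv => exact ⟨mv, rfl⟩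
    have hub : ∀ y ∈ W.map Prod.fst, y ≤ mv := PySem.List.max?_isMax hmv
    have hmem : mv ∈ W.map Prod.fst := PySem.List.max?_mem hmv
    obtain ⟨p, hpW, hpv⟩ := List.mem_map.mp hmem
    have hle1 : mv ≤ f.1 := hpv ▸ hmax p hpW
    have hle2 : f.1 ≤ mv := hub f.1 (List.mem_map_of_mem hfmem)
    rw [hmv, le_antisymm hle1 hle2]
  -- values.index(max) = len(pre)
  have hind : PySem.List.index? (W.map Prod.fst) f.1 = some pre.length := by
    apply (PySem.List.index?_eq_some_iff _ _ _).mpr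
    refine ⟨pre.map Prod.fst, suf.map Prod.fst, by rw [hWfst], by simp, ?_⟩
    intro hmem
    obtain ⟨p, hp, hpv⟩ := List.mem_map.mp hmem
    exact absurd (hpv ▸ hpre p hp) (lt_irrefl _)
  -- locations[ind] = f.2
  have hloc : (W.map Prod.snd).getD pre.length (0, 0, 0) = f.2 := by
    rw [hWsnd, show pre.length = (pre.map Prod.snd).length from by simp]
    exact getD_append_cons _ _ _ _
  -- assemble
  calc Pool V i j k (κ : Int)
      = ((PySem.List.max? (W.map Prod.fst) (fun x => x)).getD 0,
         (W.map Prod.snd).getD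
           ((PySem.List.index? (W.map Prod.fst)
             ((PySem.List.max? (W.map Prod.fst) (fun x => x)).getD 0)).getD 0) (0, 0, 0)) := by
        simp only [Pool, hloop]
    _ = Pool_alt V i j k (κ : Int) := by
        rw [hmax']
        simp only [Option.getD_some]
        rw [hind]
        simp only [Option.getD_some]
        rw [hloc, hB]

-- ===== VERDICT (by name: the statement is the Claim_ definition above) =====
theorem Pool_spec : Claim_equal_Pool := by
  intro V i j k kernel _ hPre
  apply pool_eq
  unfold Pre_Pool pvPreB at hPre
  split_ifs at hPre with h1 h2
  omega
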